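-- pv_equiv track=rewrite | github.com/joshuaspiral/identitycart | backend/app/services/product_search.py | calculate_repairability
-- ===== SOURCE A (Python) =====
-- def calculate_repairability(title: str) -> int:
--     """Estimate repairability score (1-10)"""
--     title_lower = title.lower()
--
--     # High repairability brands
--     if any(brand in title_lower for brand in ["framework", "fairphone", "system76"]):
--         return 9
--
--     # Good repairability
--     if any(brand in title_lower for brand in ["thinkpad", "elitebook", "latitude", "dell", "lenovo"]):
--         return 7
--
--     # Moderate
--     if any(brand in title_lower for brand in ["asus", "acer", "hp", "msi", "samsung"]):
--         return 6
--
--     # Low repairability (glued, soldered)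
--     if any(brand in title_lower for brand in ["macbook", "apple", "ipad", "iphone", "surface", "microsoft"]):
--         return 3
--
--     # Very low/Disposable
--     if any(word in title_lower for word in ["airpods", "buds", "disposable"]):
--         return 1
--
--     return 5  # Default average
-- ===== SOURCE B (Python) =====
-- _SCORES = {
--     "framework": 9, "fairphone": 9, "system76": 9,
--     "thinkpad": 7, "elitebook": 7, "latitude": 7, "dell": 7, "lenovo": 7,
--     "asus": 6, "acer": 6, "hp": 6, "msi": 6, "samsung": 6,
--     "macbook": 3, "apple": 3, "ipad": 3, "iphone": 3, "surface": 3, "microsoft": 3,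
--     "airpods": 1, "buds": 1, "disposable": 1,
-- }
--
--
-- def calculate_repairability(title: str) -> int:
--     """Estimate repairability score (1-10)"""
--     title_lower = title.lower()
--     return max((score for kw, score in _SCORES.items() if kw in title_lower), default=5)
-- ===== Notes on version B (the rewrite author's own statement) =====
-- stated objective: simpler
-- what changed: Replaces the ordered five-branch early-return chain with a single keyword-to-score table and one max over all matched keywords (default 5); this is exact because the original's tiers are checked in strictly descending score order, so first match equals the maximum matched score.
import Mathlib
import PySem

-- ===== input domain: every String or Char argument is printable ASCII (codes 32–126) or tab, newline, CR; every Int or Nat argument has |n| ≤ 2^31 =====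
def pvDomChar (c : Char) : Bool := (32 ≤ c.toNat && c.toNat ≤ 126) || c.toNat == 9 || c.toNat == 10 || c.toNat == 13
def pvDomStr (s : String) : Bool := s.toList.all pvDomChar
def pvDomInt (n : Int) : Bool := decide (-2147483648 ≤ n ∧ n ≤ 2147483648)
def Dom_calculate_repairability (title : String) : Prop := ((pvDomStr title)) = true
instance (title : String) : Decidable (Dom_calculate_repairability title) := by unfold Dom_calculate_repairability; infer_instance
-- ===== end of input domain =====

-- B replaces A's ordered early-return brand-tier chain by one keyword→score table and a max over
-- all matched keywords (default 5); exact because A's tiers are checked in strictly descending order.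

-- ===== PORT A =====
def calculate_repairability (title : String) : Int :=
  let tl := PySem.Str.lower title
  if ["framework", "fairphone", "system76"].any (fun b => PySem.Str.isIn b tl) then 9
  else if ["thinkpad", "elitebook", "latitude", "dell", "lenovo"].any (fun b => PySem.Str.isIn b tl) then 7
  else if ["asus", "acer", "hp", "msi", "samsung"].any (fun b => PySem.Str.isIn b tl) then 6
  else if ["macbook", "apple", "ipad", "iphone", "surface", "microsoft"].any (fun b => PySem.Str.isIn b tl) then 3
  else if ["airpods", "buds", "disposable"].any (fun w => PySem.Str.isIn w tl) then 1
  else 5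

-- ===== PORT B =====
def pvScores : List (String × Int) :=
  [("framework", 9), ("fairphone", 9), ("system76", 9),
   ("thinkpad", 7), ("elitebook", 7), ("latitude", 7), ("dell", 7), ("lenovo", 7),
   ("asus", 6), ("acer", 6), ("hp", 6), ("msi", 6), ("samsung", 6),
   ("macbook", 3), ("apple", 3), ("ipad", 3), ("iphone", 3), ("surface", 3), ("microsoft", 3),
   ("airpods", 1), ("buds", 1), ("disposable", 1)]

-- max(gen, default=5): the matched scores folded with max, or 5 if no keyword matched
def calculate_repairability_alt (title : String) : Int :=
  let tl := PySem.Str.lower title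
  match pvScores.filter (fun p => PySem.Str.isIn p.1 tl) with
  | [] => 5
  | x :: xs => xs.foldl (fun acc p => max acc p.2) x.2

-- ===== PRECONDITION & SPEC =====
def Spec_calculate_repairability (title : String) (out : Int) : Prop := out = calculate_repairability_alt title
instance (title : String) (out : Int) : Decidable (Spec_calculate_repairability title out) := by unfold Spec_calculate_repairability; infer_instance

-- ===== CLAIM (what is proved, stated in full; the proofs are below) =====
def Claim_equal_calculate_repairability : Prop := ∀ (title : String), Dom_calculate_repairability title → Spec_calculate_repairability title (calculate_repairability title)

-- ===== LEMMAS AND PROOFS =====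

-- tier slices of the table (proof-only names)
def pvT9 : List (String × Int) := [("framework", 9), ("fairphone", 9), ("system76", 9)]
def pvT7 : List (String × Int) := [("thinkpad", 7), ("elitebook", 7), ("latitude", 7), ("dell", 7), ("lenovo", 7)]
def pvT6 : List (String × Int) := [("asus", 6), ("acer", 6), ("hp", 6), ("msi", 6), ("samsung", 6)]
def pvT3 : List (String × Int) := [("macbook", 3), ("apple", 3), ("ipad", 3), ("iphone", 3), ("surface", 3), ("microsoft", 3)]
def pvT1 : List (String × Int) := [("airpods", 1), ("buds", 1), ("disposable", 1)]

theorem foldmax_const {a : Int} {L : List (String × Int)} (h : ∀ p ∈ L, p.2 ≤ a) :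
    L.foldl (fun acc p => max acc p.2) a = a := by
  induction L with
  | nil => rfl
  | cons x xs ih =>
    have hx : x.2 ≤ a := h x List.mem_cons_self
    simp only [List.foldl_cons, max_eq_left hx]
    exact ih fun p hp => h p (List.mem_cons_of_mem _ hp)

-- the first nonempty matched tier determines the max: F nonempty with constant score c, rest ≤ c
theorem maxmatch_eq (c : Int) (F R : List (String × Int)) (hne : F ≠ [])
    (hFc : ∀ p ∈ F, p.2 = c) (hR : ∀ p ∈ R, p.2 ≤ c) :
    (match F ++ R with
     | [] => (5 : Int)
     | x :: xs => xs.foldl (fun acc p => max acc p.2) x.2) = c := by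
  cases F with
  | nil => exact absurd rfl hne
  | cons x xs =>
    simp only [List.cons_append]
    rw [hFc x List.mem_cons_self]
    exact foldmax_const fun p hp => by
      rcases List.mem_append.1 hp with h | h
      · exact le_of_eq (hFc p (List.mem_cons_of_mem _ h))
      · exact hR p h

theorem filter_fst_ne_nil (f : String → Bool) (L : List (String × Int)) (S : List String)
    (hmap : L.map Prod.fst = S) (h : S.any f = true) :
    L.filter (fun p => f p.1) ≠ [] := by
  subst hmap
  rcases List.any_eq_true.1 h with ⟨s, hs, hfs⟩
  rcases List.mem_map.1 hs with ⟨p, hp, rfl⟩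
  intro hnil
  exact absurd hfs (by simpa using (List.filter_eq_nil_iff.1 hnil p hp))

theorem filter_fst_nil (f : String → Bool) (L : List (String × Int)) (S : List String)
    (hmap : L.map Prod.fst = S) (h : S.any f = false) :
    L.filter (fun p => f p.1) = [] := by
  subst hmap
  refine List.filter_eq_nil_iff.2 fun p hp => ?_
  have := List.any_eq_false.1 h p.1 (List.mem_map.2 ⟨p, hp, rfl⟩)
  simpa using this

theorem le_of_mem_filter {c : Int} {L : List (String × Int)} (f : String → Bool)
    (h : ∀ p ∈ L, p.2 ≤ c) : ∀ p ∈ L.filter (fun p => f p.1), p.2 ≤ c :=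
  fun p hp => h p (List.mem_of_mem_filter hp)

theorem eq_of_mem_filter {c : Int} {L : List (String × Int)} (f : String → Bool)
    (h : ∀ p ∈ L, p.2 = c) : ∀ p ∈ L.filter (fun p => f p.1), p.2 = c :=
  fun p hp => h p (List.mem_of_mem_filter hp)

theorem calculate_repairability_spec : Claim_equal_calculate_repairability := by
  intro title _
  unfold Spec_calculate_repairability calculate_repairability calculate_repairability_alt
  set tl := PySem.Str.lower title with htl
  set f : String → Bool := fun s => PySem.Str.isIn s tl with hf
  rw [show pvScores = pvT9 ++ (pvT7 ++ (pvT6 ++ (pvT3 ++ pvT1))) from rfl]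
  simp only [List.filter_append]
  by_cases h9 : (["framework", "fairphone", "system76"].any f) = true
  · rw [if_pos h9]
    exact (maxmatch_eq 9 _ _ (filter_fst_ne_nil f pvT9 _ rfl h9)
      (eq_of_mem_filter f (by decide))
      (by simp only [← List.filter_append]
          exact le_of_mem_filter f (by decide))).symm
  · rw [if_neg h9, filter_fst_nil f pvT9 _ rfl (Bool.eq_false_iff.2 h9), List.nil_append]
    by_cases h7 : (["thinkpad", "elitebook", "latitude", "dell", "lenovo"].any f) = true
    · rw [if_pos h7]
      exact (maxmatch_eq 7 _ _ (filter_fst_ne_nil f pvT7 _ rfl h7)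
        (eq_of_mem_filter f (by decide))
        (by simp only [← List.filter_append]
            exact le_of_mem_filter f (by decide))).symm
    · rw [if_neg h7, filter_fst_nil f pvT7 _ rfl (Bool.eq_false_iff.2 h7), List.nil_append]
      by_cases h6 : (["asus", "acer", "hp", "msi", "samsung"].any f) = true
      · rw [if_pos h6]
        exact (maxmatch_eq 6 _ _ (filter_fst_ne_nil f pvT6 _ rfl h6)
          (eq_of_mem_filter f (by decide))
          (by simp only [← List.filter_append]
              exact le_of_mem_filter f (by decide))).symm
      · rw [if_neg h6, filter_fst_nil f pvT6 _ rfl (Bool.eq_false_iff.2 h6), List.nil_append]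
        by_cases h3 : (["macbook", "apple", "ipad", "iphone", "surface", "microsoft"].any f) = true
        · rw [if_pos h3]
          exact (maxmatch_eq 3 _ _ (filter_fst_ne_nil f pvT3 _ rfl h3)
            (eq_of_mem_filter f (by decide))
            (le_of_mem_filter f (by decide))).symm
        · rw [if_neg h3, filter_fst_nil f pvT3 _ rfl (Bool.eq_false_iff.2 h3), List.nil_append]
          by_cases h1 : (["airpods", "buds", "disposable"].any f) = true
          · rw [if_pos h1]
            have := maxmatch_eq 1 (pvT1.filter (fun p => f p.1)) []
              (filter_fst_ne_nil f pvT1 _ rfl h1)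
              (eq_of_mem_filter f (by decide)) (by simp)
            simpa using this.symm
          · rw [if_neg h1, filter_fst_nil f pvT1 _ rfl (Bool.eq_false_iff.2 h1)]

-- ===== VERDICT (by name: the statement is the Claim_ definition above) =====
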